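-- pv_equiv track=rewrite | github.com/Jungsu-lilly/coding_test_study | 프로그래머스/lv1/하정수/140108.py | solution
-- ===== SOURCE A (Python) =====
-- def solution(s):
--     ans = 0
--     a, b = 0, 0
--     k = ''
--
--     for i in s:
--         if a == b:
--             k = i
--             ans += 1
--             a, b = 0, 0
--         if k == i:
--             a += 1
--         else:
--             b += 1
--
--     return ans
-- ===== SOURCE B (Python) =====
-- def solution(s):
--     ans = 0
--     while s:
--         ans += 1
--         k = s[0]
--         for m in range(1, len(s) // 2 + 1):
--             # the segment closes after 2*m characters iff exactly half of them equal k
--             if s[:2 * m].count(k) == m: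
--                 s = s[2 * m:]
--                 break
--         else:
--             s = ''
--     return ans
-- ===== Notes on version B (the rewrite author's own statement) =====
-- stated objective: alternative
-- what changed: Replaces A's stateful O(n) single pass with two running counters by a staged prefix-count search: for each remaining string it scans candidate even cut lengths 2m and closes the segment at the smallest prefix s[:2m] in which the head character occurs exactly m times (via str.count), then slices the string and repeats.
import Mathlib
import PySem

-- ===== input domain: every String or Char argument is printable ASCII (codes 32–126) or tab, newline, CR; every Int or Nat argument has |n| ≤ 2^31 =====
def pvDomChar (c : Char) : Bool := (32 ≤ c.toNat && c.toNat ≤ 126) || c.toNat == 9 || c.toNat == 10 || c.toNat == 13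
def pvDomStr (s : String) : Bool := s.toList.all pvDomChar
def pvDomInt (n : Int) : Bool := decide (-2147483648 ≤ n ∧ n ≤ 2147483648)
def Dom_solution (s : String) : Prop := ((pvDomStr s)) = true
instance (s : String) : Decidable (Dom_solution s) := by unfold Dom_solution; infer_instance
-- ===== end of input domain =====

-- B replaces A's stateful single pass (two running counters reset at each segment head) by a
-- staged search: for each remaining string it looks for the smallest even prefix in which the
-- head character makes up exactly half of the characters, and cuts there (objective: alternative).

-- ===== PORT A =====
-- state = (ans, a, b, k); Python's k = '' is ported as `none` (it is only ever compared
-- against one-character strings, and '' never equals one, exactly like `none = some c`).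
def solutionStep (st : Int × Int × Int × Option Char) (c : Char) : Int × Int × Int × Option Char :=
  let st1 := if st.2.1 = st.2.2.1 then (st.1 + 1, (0 : Int), (0 : Int), some c) else st
  if st1.2.2.2 = some c then (st1.1, st1.2.1 + 1, st1.2.2.1, st1.2.2.2)
  else (st1.1, st1.2.1, st1.2.2.1 + 1, st1.2.2.2)

def solution (s : String) : Int := (s.toList.foldl solutionStep (0, 0, 0, none)).1

-- ===== PORT B =====
-- the inner `for m in range(1, len(s) // 2 + 1)` search of Source B; s[:2*m] is List.take (2*m)
-- (slice with nonnegative bound) and str.count of the single character k is List.count k.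
def findB (seg : List Char) (k : Char) : List Nat → Option Nat
  | [] => none
  | m :: ms => if (seg.take (2 * m)).count k = m then some m else findB seg k ms

-- needed by solB's termination proof: a found m comes from the searched range
theorem findB_mem (seg : List Char) (k : Char) (ms : List Nat) (m : Nat)
    (h : findB seg k ms = some m) : m ∈ ms := by
  induction ms with
  | nil => simp [findB] at h
  | cons x xs ih =>
    simp only [findB] at h
    split at h
    · simp_all
    · exact List.mem_cons_of_mem _ (ih h)

-- the outer `while s:` loop of Source B; range(1, len(s)//2 + 1) is List.range' 1 (len/2),
-- s[2*m:] is List.drop (2*m) (slice with nonnegative start); the for-else sets s = ''.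
def solB : List Char → Int
  | [] => 0
  | c :: rest =>
    match h : findB (c :: rest) c (List.range' 1 ((c :: rest).length / 2)) with
    | some m => 1 + solB ((c :: rest).drop (2 * m))
    | none => 1 + solB []
termination_by l => l.length
decreasing_by
  · have hm := findB_mem _ _ _ _ h
    have h1 : 1 ≤ m := by
      have := List.mem_range'_1.mp hm
      omega
    simp only [List.length_drop, List.length_cons]
    omega
  · simp

def solution_alt (s : String) : Int := solB s.toList

-- ===== PRECONDITION & SPEC =====
def Spec_solution (s : String) (out : Int) : Prop := out = solution_alt s
instance (s : String) (out : Int) : Decidable (Spec_solution s out) := by unfold Spec_solution; infer_instance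

-- ===== CLAIM (what is proved, stated in full; the proofs are below) =====
def Claim_equal_solution : Prop := ∀ (s : String), Dom_solution s → Spec_solution s (solution s)

-- ===== LEMMAS AND PROOFS =====

-- proof-side bridge: A's pass described as a segment recursion with a running balance
def consumeB (k : Char) : Int → List Char → List Char
  | _, [] => []
  | bal, c :: rest =>
    if bal = 0 then c :: rest
    else consumeB k (bal + (if c = k then 1 else -1)) rest

theorem consumeB_length_le (k : Char) (bal : Int) (l : List Char) :
    (consumeB k bal l).length ≤ l.length := by
  induction l generalizing bal with
  | nil => simp [consumeB]
  | cons c rest ih =>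
    simp only [consumeB]
    split
    · simp
    · exact Nat.le_succ_of_le (ih _)

def segCountB : List Char → Int
  | [] => 0
  | c :: rest => 1 + segCountB (consumeB c 1 rest)
termination_by l => l.length
decreasing_by simpa using Nat.lt_succ_of_le (consumeB_length_le c 1 rest)

theorem consumeB_zero (k : Char) (l : List Char) : consumeB k 0 l = l := by
  cases l <;> simp [consumeB]

-- combined invariant: from a segment-boundary state (a = b) A's fold counts segCountB l more
-- groups; from a mid-segment state (a ≠ b, key kc) it counts segCountB of the unconsumed rest.
theorem fold_inv (l : List Char) :
    (∀ ans a b (k : Option Char), a = b →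
      (l.foldl solutionStep (ans, a, b, k)).1 = ans + segCountB l) ∧
    (∀ ans a b (kc : Char), a ≠ b →
      (l.foldl solutionStep (ans, a, b, some kc)).1 = ans + segCountB (consumeB kc (a - b) l)) := by
  induction l with
  | nil =>
    refine ⟨?_, ?_⟩ <;> intros <;> simp [segCountB, consumeB]
  | cons c rest ih =>
    refine ⟨?_, ?_⟩
    · intro ans a b k hab
      have hstep : solutionStep (ans, a, b, k) c = (ans + 1, 1, 0, some c) := by
        simp [solutionStep, hab]
      rw [List.foldl_cons, hstep, ih.2 (ans + 1) 1 0 c (by norm_num)]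
      simp [segCountB]
      ring
    · intro ans a b kc hab
      by_cases hc : c = kc
      · have hstep : solutionStep (ans, a, b, some kc) c = (ans, a + 1, b, some kc) := by
          simp [solutionStep, hab, hc]
        rw [List.foldl_cons, hstep]
        have hcons : consumeB kc (a - b) (c :: rest) = consumeB kc (a - b + 1) rest := by
          simp [consumeB, sub_eq_zero.not.mpr hab, hc]
        rw [hcons]
        by_cases h0 : a + 1 = b
        · rw [ih.1 ans (a + 1) b (some kc) h0]
          have : a - b + 1 = 0 := by omega
          rw [this, consumeB_zero]
        · rw [ih.2 ans (a + 1) b kc h0]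
          have : a + 1 - b = a - b + 1 := by ring
          rw [this]
      · have hstep : solutionStep (ans, a, b, some kc) c = (ans, a, b + 1, some kc) := by
          simp [solutionStep, hab, Ne.symm hc]
        rw [List.foldl_cons, hstep]
        have hcons : consumeB kc (a - b) (c :: rest) = consumeB kc (a - b + -1) rest := by
          simp [consumeB, sub_eq_zero.not.mpr hab, hc]
        rw [hcons]
        by_cases h0 : a = b + 1
        · rw [ih.1 ans a (b + 1) (some kc) h0]
          have : a - b + -1 = 0 := by omega
          rw [this, consumeB_zero]
        · rw [ih.2 ans a (b + 1) kc h0]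
          have : a - (b + 1) = a - b + -1 := by ring
          rw [this]

-- how far consumeB consumes, as an index
def stopIdx (k : Char) : Int → List Char → Nat
  | _, [] => 0
  | bal, c :: cs => if bal = 0 then 0 else 1 + stopIdx k (bal + (if c = k then 1 else -1)) cs

theorem consumeB_eq_drop (k : Char) (bal : Int) (l : List Char) :
    consumeB k bal l = l.drop (stopIdx k bal l) := by
  induction l generalizing bal with
  | nil => simp [consumeB, stopIdx]
  | cons c cs ih =>
    simp only [consumeB, stopIdx]
    by_cases hbal : bal = 0
    · simp [hbal]
    · simp only [if_neg hbal, Nat.add_comm 1, List.drop_succ_cons]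
      exact ih _

theorem stopIdx_le (k : Char) (bal : Int) (l : List Char) : stopIdx k bal l ≤ l.length := by
  induction l generalizing bal with
  | nil => simp [stopIdx]
  | cons c cs ih =>
    simp only [stopIdx, List.length_cons]
    by_cases hbal : bal = 0
    · simp [hbal]
    · have := ih (bal + (if c = k then 1 else -1))
      simp only [if_neg hbal]
      omega

-- before the stop index the running balance is nonzero …
theorem stopIdx_min (k : Char) (bal : Int) (l : List Char) :
    ∀ j < stopIdx k bal l, bal + 2 * ((l.take j).count k : Int) - j ≠ 0 := by
  induction l generalizing bal with
  | nil => simp [stopIdx]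
  | cons c cs ih =>
    intro j hj
    simp only [stopIdx] at hj
    by_cases hbal : bal = 0
    · simp [hbal] at hj
    · rw [if_neg hbal] at hj
      cases j with
      | zero => simpa using hbal
      | succ j' =>
        have := ih (bal + (if c = k then 1 else -1)) j' (by omega)
        simp only [List.take_succ_cons, List.count_cons]
        by_cases hc : c = k <;> simp [hc] at this ⊢ <;> omega

-- … and at a stop index inside the list it is zero
theorem stopIdx_zero (k : Char) (bal : Int) (l : List Char)
    (h : stopIdx k bal l < l.length) :
    bal + 2 * ((l.take (stopIdx k bal l)).count k : Int) - stopIdx k bal l = 0 := by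
  induction l generalizing bal with
  | nil => simp at h
  | cons c cs ih =>
    simp only [stopIdx, List.length_cons] at h ⊢
    by_cases hbal : bal = 0
    · rw [if_pos hbal]
      simpa using hbal
    · rw [if_neg hbal] at h ⊢
      have h' : stopIdx k (bal + (if c = k then 1 else -1)) cs < cs.length := by omega
      have := ih (bal + (if c = k then 1 else -1)) h'
      rw [Nat.add_comm 1 (stopIdx k (bal + (if c = k then 1 else -1)) cs)]
      simp only [List.take_succ_cons, List.count_cons]
      by_cases hc : c = k <;> simp [hc] at this ⊢ <;> omega

-- findB over range' 1 q returns the least m ∈ [1, q] whose 2m-prefix is half k's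
theorem findB_some_spec (seg : List Char) (k : Char) :
    ∀ (a q m : Nat), findB seg k (List.range' a q) = some m →
      (seg.take (2 * m)).count k = m ∧ a ≤ m ∧ m < a + q ∧
      ∀ j, a ≤ j → j < m → (seg.take (2 * j)).count k ≠ j := by
  intro a q
  induction q generalizing a with
  | zero => intro m h; simp [findB] at h
  | succ q ih =>
    intro m h
    rw [List.range'_succ] at h
    simp only [findB] at h
    split at h
    · rename_i hq
      obtain rfl : a = m := by simpa using h
      exact ⟨hq, le_refl _, by omega, fun j h1 h2 => by omega⟩
    · rename_i hq
      obtain ⟨h1, h2, h3, h4⟩ := ih (a + 1) m h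
      refine ⟨h1, by omega, by omega, fun j hj1 hj2 => ?_⟩
      rcases Nat.eq_or_lt_of_le hj1 with rfl | hlt
      · exact hq
      · exact h4 j hlt hj2

theorem findB_none_spec (seg : List Char) (k : Char) :
    ∀ (a q : Nat), findB seg k (List.range' a q) = none →
      ∀ j, a ≤ j → j < a + q → (seg.take (2 * j)).count k ≠ j := by
  intro a q
  induction q generalizing a with
  | zero => intro _ j h1 h2; omega
  | succ q ih =>
    intro h j h1 h2
    rw [List.range'_succ] at h
    simp only [findB] at h
    split at h
    · simp at h
    · rename_i hq
      rcases Nat.eq_or_lt_of_le h1 with rfl | hlt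
      · exact hq
      · exact ih (a + 1) h j hlt (by omega)

-- counting over the segment vs over its tail
theorem count_take_cons (c : Char) (rest : List Char) (t : Nat) :
    ((c :: rest).take (t + 1)).count c = (rest.take t).count c + 1 := by
  simp [List.take_succ_cons]

-- the found cut equals the point where A's balance returns to zero
theorem key_some (c : Char) (rest : List Char) (m : Nat)
    (h : findB (c :: rest) c (List.range' 1 ((c :: rest).length / 2)) = some m) :
    consumeB c 1 rest = (c :: rest).drop (2 * m) := by
  obtain ⟨hQ, hm1, hm2, hmin⟩ := findB_some_spec (c :: rest) c 1 _ m h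
  have hn : 2 * m ≤ rest.length + 1 := by
    have := hm2
    simp only [List.length_cons] at this
    omega
  -- the balance over `rest` is zero at t := 2m - 1
  have hQ' : ((rest.take (2 * m - 1)).count c : Int) = m - 1 := by
    have h1 : (2 * m - 1) + 1 = 2 * m := by omega
    have := count_take_cons c rest (2 * m - 1)
    rw [h1, hQ] at this
    omega
  have hstop : stopIdx c 1 rest = 2 * m - 1 := by
    have hle : stopIdx c 1 rest ≤ 2 * m - 1 := by
      by_contra hgt
      have := stopIdx_min c 1 rest (2 * m - 1) (by omega)
      rw [hQ'] at this
      omega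
    rcases Nat.eq_or_lt_of_le hle with heq | hlt
    · exact heq
    · exfalso
      have hlen : stopIdx c 1 rest < rest.length := by omega
      have hz := stopIdx_zero c 1 rest hlen
      set j := stopIdx c 1 rest with hj
      -- j = 2c' + 1; the prefix of length j+1 of the segment is half c's, contradicting minimality
      set c' : Nat := (rest.take j).count c with hc'
      have hjodd : (j : Int) = 2 * c' + 1 := by omega
      have hm' : ((c :: rest).take (2 * (c' + 1))).count c = c' + 1 := by
        have h1 : 2 * (c' + 1) = j + 1 := by omega
        rw [h1, count_take_cons]
      have := hmin (c' + 1) (by omega) (by omega)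
      exact this hm'
  have h2 : (c :: rest).drop (2 * m) = rest.drop (2 * m - 1) := by
    have h3 : 2 * m = (2 * m - 1) + 1 := by omega
    conv_lhs => rw [h3]
    rw [List.drop_succ_cons]
  rw [consumeB_eq_drop, hstop, h2]

-- no cut found: A's balance never returns to zero, the segment is the whole string
theorem key_none (c : Char) (rest : List Char)
    (h : findB (c :: rest) c (List.range' 1 ((c :: rest).length / 2)) = none) :
    consumeB c 1 rest = [] := by
  have hnone := findB_none_spec (c :: rest) c 1 _ h
  have hstop : stopIdx c 1 rest = rest.length := by
    rcases Nat.eq_or_lt_of_le (stopIdx_le c 1 rest) with heq | hlt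
    · exact heq
    · exfalso
      have hz := stopIdx_zero c 1 rest hlt
      set j := stopIdx c 1 rest with hj
      set c' : Nat := (rest.take j).count c with hc'
      have hjodd : (j : Int) = 2 * c' + 1 := by omega
      have hm' : ((c :: rest).take (2 * (c' + 1))).count c = c' + 1 := by
        have h1 : 2 * (c' + 1) = j + 1 := by omega
        rw [h1, count_take_cons]
      exact hnone (c' + 1) (by omega) (by simp only [List.length_cons]; omega) hm'
  rw [consumeB_eq_drop, hstop, List.drop_length]

theorem solB_eq_aux : ∀ (n : Nat) (l : List Char), l.length ≤ n → solB l = segCountB l := by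
  intro n
  induction n with
  | zero =>
    intro l hl
    have : l = [] := by
      cases l
      · rfl
      · simp at hl
    subst this
    simp [solB, segCountB]
  | succ n ih =>
    intro l hl
    cases l with
    | nil => simp [solB, segCountB]
    | cons c rest =>
      rw [solB]
      split
      · rename_i m hfind
        have hm1 : 1 ≤ m := by
          have := List.mem_range'_1.mp (findB_mem _ _ _ _ hfind)
          omega
        have hl' : rest.length ≤ n := by simpa using hl
        have hrec : solB ((c :: rest).drop (2 * m)) = segCountB ((c :: rest).drop (2 * m)) := by
          apply ih
          simp only [List.length_drop, List.length_cons]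
          omega
        conv_rhs => rw [segCountB]
        rw [key_some c rest m hfind, hrec]
      · rename_i hfind
        conv_rhs => rw [segCountB]
        rw [key_none c rest hfind]
        simp [solB, segCountB]

-- ===== VERDICT (by name: the statement is the Claim_ definition above) =====
theorem solution_spec : Claim_equal_solution := by
  intro s _
  unfold Spec_solution solution solution_alt
  rw [solB_eq_aux s.toList.length s.toList (le_refl _)]
  simpa using (fold_inv s.toList).1 0 0 0 none rfl
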